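-- pv_equiv track=rewrite | github.com/HakierGrzonzo/studiaNotowane | kod III/Języki Skryptowe/kol_2/zad2.py | tobase12
-- ===== SOURCE A (Python) =====
-- def tobase12(n: int) -> str:
--     if n == 0:
--         return '0'
--
--     base = "0123456789AB"
--     res = ""
--     if n < 0:
--         res += "-"
--         n = abs(n)
--     while n > 0:
--         res = base[n % 12] + res
--         n //= 12
--     return res
-- ===== SOURCE B (Python) =====
-- def tobase12(n: int) -> str:
--     if n == 0:
--         return '0'
--     base = "0123456789AB"
--     m = abs(n)
--     k, p = 0, 1
--     while p <= m:
--         p *= 12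
--         k += 1
--     s = ''.join(base[(m // 12 ** i) % 12] for i in range(k - 1, -1, -1))
--     return '-' + s if n < 0 else s
-- ===== Notes on version B (the rewrite author's own statement) =====
-- stated objective: alternative
-- what changed: Instead of A's least-significant-first loop that repeatedly divides and prepends digits, B first finds the digit count k with a power-of-12 loop and then reads each digit directly as (m // 12**i) % 12 over range(k-1,-1,-1), most-significant first; B also writes the minus sign in front instead of A's accidental trailing position.
-- intended difference: For negative n, A appends '-' after the digits (tobase12(-13) = '11-') because the loop prepends digits before the already-placed minus; B returns the conventional '-' followed by the digits ('-11'), which is the intended base-12 representation. — e.g. on tobase12(-13): A returns "11-", B returns "-11"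
import Mathlib
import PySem

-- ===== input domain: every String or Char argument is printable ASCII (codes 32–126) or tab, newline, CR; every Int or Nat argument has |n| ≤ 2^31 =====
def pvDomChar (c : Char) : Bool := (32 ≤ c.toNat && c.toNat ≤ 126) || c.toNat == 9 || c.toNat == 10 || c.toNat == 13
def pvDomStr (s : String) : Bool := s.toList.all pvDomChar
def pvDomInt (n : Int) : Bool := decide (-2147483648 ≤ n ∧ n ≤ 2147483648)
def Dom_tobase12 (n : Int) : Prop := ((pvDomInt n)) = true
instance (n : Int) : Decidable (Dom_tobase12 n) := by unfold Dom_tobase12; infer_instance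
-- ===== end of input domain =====

-- B computes the digit count by a power loop and then reads each digit directly as
-- (m // 12**i) % 12, most-significant first, instead of A's least-significant prepend
-- loop; B also writes the minus sign in FRONT (A accidentally puts it after the digits).

-- ===== PORT A =====
-- the digit alphabet base = "0123456789AB" (as its character list)
def tbBase : List Char := "0123456789AB".toList

-- the while loop: while n > 0: res = base[n % 12] + res; n //= 12
-- (pyGetD's default is a totality guard only: 0 ≤ n % 12 < 12 is always in range)
def tbLoopA (n : Int) (res : List Char) : List Char :=
  if h : 0 < n then
    tbLoopA (PySem.Int.floordiv n 12)
      (PySem.List.pyGetD tbBase (PySem.Int.mod n 12) '0' :: res)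
  else res
termination_by n.toNat
decreasing_by
  have h1 : PySem.Int.floordiv n 12 = n / 12 :=
    PySem.Int.floordiv_eq_ediv_of_pos (by norm_num)
  have h2 : n / 12 < n := (Int.ediv_lt_iff_lt_mul (by norm_num)).mpr (by nlinarith)
  have h3 : 0 ≤ n / 12 := Int.ediv_nonneg (le_of_lt h) (by norm_num)
  omega

def tobase12 (n : Int) : String :=
  if n == 0 then "0"
  else
    let (res, m) := if n < 0 then (['-'], |n|) else (([] : List Char), n)
    String.ofList (tbLoopA m res)

-- ===== PORT B =====
-- the counting loop: while p <= m: p *= 12; k += 1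
-- (the 0 < p half of the guard is a totality guard only: p is always a power of 12)
def tbNumDigits (m p k : Int) : Int :=
  if h : 0 < p ∧ p ≤ m then tbNumDigits m (p * 12) (k + 1) else k
termination_by (m + 1 - p).toNat
decreasing_by
  have hlt : p < p * 12 := by nlinarith [h.1]
  omega

-- base[(m // 12 ** i) % 12]   (i ≥ 0 always: i ranges over range(k-1,-1,-1);
-- 12 ** i is ported as (12:Int) ^ i.toNat, exact for i ≥ 0)
def tbDigitAt (m i : Int) : Char :=
  PySem.List.pyGetD tbBase
    (PySem.Int.mod (PySem.Int.floordiv m ((12 : Int) ^ i.toNat)) 12) '0'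

def tobase12_alt (n : Int) : String :=
  if n == 0 then "0"
  else
    let m := |n|
    let k := tbNumDigits m 1 0
    let s := String.ofList ((PySem.List.pyRange (k - 1) (-1) (-1)).map (tbDigitAt m))
    if n < 0 then "-" ++ s else s

-- ===== PRECONDITION & SPEC =====
-- For negative n, A returns the digits with a TRAILING minus ('11-' for -13) because the
-- loop prepends digits before the already-placed '-'; B puts the minus in front ('-11'),
-- which is the intended base-12 representation.
def D_tobase12 (n : Int) : Prop := n < 0
instance (n : Int) : Decidable (D_tobase12 n) := by unfold D_tobase12; infer_instance

def Spec_tobase12 (n : Int) (out : String) : Prop := ¬ D_tobase12 n → out = tobase12_alt n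
instance (n : Int) (out : String) : Decidable (Spec_tobase12 n out) := by unfold Spec_tobase12; infer_instance

def pvDiffWitness_tobase12 : Int := (-13)
def pvDiffWitnessOut_tobase12 : String × String := ("11-", "-11")

-- ===== CLAIM (what is proved, stated in full; the proofs are below) =====
def Claim_unchanged_tobase12 : Prop := ∀ (n : Int), Dom_tobase12 n → Spec_tobase12 n (tobase12 n)
def Claim_changed_tobase12 : Prop := Dom_tobase12 (pvDiffWitness_tobase12) ∧ D_tobase12 (pvDiffWitness_tobase12) ∧ tobase12 (pvDiffWitness_tobase12) = pvDiffWitnessOut_tobase12.1 ∧ tobase12_alt (pvDiffWitness_tobase12) = pvDiffWitnessOut_tobase12.2 ∧ pvDiffWitnessOut_tobase12.1 ≠ pvDiffWitnessOut_tobase12.2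
def Claim_exact_tobase12 : Prop := ∀ (n : Int), Dom_tobase12 n → D_tobase12 n → tobase12 n ≠ tobase12_alt n

-- ===== LEMMAS AND PROOFS =====

-- shifting the digit index by one is dividing the number by 12
theorem tbDigitAt_succ (m : Int) (i : Int) (hi : 0 ≤ i) :
    tbDigitAt m (i + 1) = tbDigitAt (PySem.Int.floordiv m 12) i := by
  unfold tbDigitAt
  have hp : (0:Int) < (12 : Int) ^ i.toNat := by positivity
  have hp' : (0:Int) < (12 : Int) ^ (i+1).toNat := by positivity
  rw [PySem.Int.floordiv_eq_ediv_of_pos (show (0:Int) < 12 by norm_num),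
      PySem.Int.floordiv_eq_ediv_of_pos hp, PySem.Int.floordiv_eq_ediv_of_pos hp']
  have ht : (i + 1).toNat = i.toNat + 1 := by omega
  rw [ht, pow_succ', ← Int.ediv_ediv_of_nonneg (show (0:Int) ≤ 12 by norm_num)]

-- the digit at index 0 is m % 12
theorem tbDigitAt_zero (m : Int) :
    tbDigitAt m 0 = PySem.List.pyGetD tbBase (PySem.Int.mod m 12) '0' := by
  unfold tbDigitAt
  rw [show ((0:Int)).toNat = 0 from rfl, pow_zero,
      PySem.Int.floordiv_eq_ediv_of_pos (show (0:Int) < 1 by norm_num), Int.ediv_one]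

-- A's loop on a (kn+1)-digit number produces exactly B's digit list for k = kn+1
theorem tbLoopA_eq_digits (kn : Nat) :
    ∀ (m : Int) (res : List Char), (12:Int)^kn ≤ m → m < (12:Int)^(kn+1) →
      tbLoopA m res = (PySem.List.pyRange (kn : Int) (-1) (-1)).map (tbDigitAt m) ++ res := by
  induction kn with
  | zero =>
    intro m res hlo hhi
    simp only [pow_zero] at hlo hhi
    rw [tbLoopA]
    have hm : 0 < m := by omega
    have hq : PySem.Int.floordiv m 12 = 0 := by
      rw [PySem.Int.floordiv_eq_ediv_of_pos (by norm_num)]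
      omega
    rw [dif_pos hm, hq, tbLoopA, dif_neg (by norm_num)]
    rw [show ((0:Nat):Int) = 0 from rfl,
        PySem.List.pyRange_neg_one_cons (by norm_num),
        PySem.List.pyRange_neg_one_eq_nil (by norm_num)]
    simp only [List.map_cons, List.map_nil, List.cons_append, List.nil_append]
    rw [tbDigitAt_zero]
  | succ kn ih =>
    intro m res hlo hhi
    have hm : 0 < m := lt_of_lt_of_le (by positivity) hlo
    rw [tbLoopA, dif_pos hm]
    have h12 : PySem.Int.floordiv m 12 = m / 12 :=
      PySem.Int.floordiv_eq_ediv_of_pos (by norm_num)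
    have hqlo : (12:Int)^kn ≤ PySem.Int.floordiv m 12 := by
      rw [h12, Int.le_ediv_iff_mul_le (by norm_num)]
      calc (12:Int)^kn * 12 = 12^(kn+1) := by rw [pow_succ]
        _ ≤ m := hlo
    have hqhi : PySem.Int.floordiv m 12 < (12:Int)^(kn+1) := by
      rw [h12, Int.ediv_lt_iff_lt_mul (by norm_num)]
      calc m < (12:Int)^(kn+1+1) := hhi
        _ = 12^(kn+1) * 12 := by rw [pow_succ]
    rw [ih _ _ hqlo hqhi]
    rw [PySem.List.pyRange_neg_one, PySem.List.pyRange_neg_one]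
    have hn1 : (((kn:Nat)+1 : Nat) : Int) - (-1) = ((kn:Int) + 2) := by push_cast; ring
    have hn2 : ((kn:Int) - (-1)).toNat = kn + 1 := by omega
    rw [hn1, show (((kn:Int) + 2)).toNat = kn + 2 by omega, hn2,
        show List.range (kn+2) = List.range (kn+1) ++ [kn+1] from List.range_succ]
    simp only [List.map_append, List.map_map, List.map_cons, List.map_nil,
      List.append_assoc, List.cons_append, List.nil_append]
    congr 1
    · apply List.map_congr_left
      intro j hj
      simp only [List.mem_range] at hj
      simp only [Function.comp]
      rw [show (((kn:Nat)+1 : Nat) : Int) - (j:Int) = ((kn:Int) - (j:Int)) + 1 by push_cast; ring]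
      rw [tbDigitAt_succ m _ (by omega)]
    · congr 1
      rw [show (((kn:Nat)+1 : Nat) : Int) - ((kn+1 : Nat) : Int) = 0 by ring]
      rw [tbDigitAt_zero]

-- the counting loop finds the exponent: result = k + e with m < p·12^e and (e = 0 or p·12^(e-1) ≤ m)
theorem tbNumDigits_spec (d : Nat) :
    ∀ (m p k : Int), 0 < p → m < p * 12^d →
      ∃ e : Nat, tbNumDigits m p k = k + e ∧ m < p * 12^e ∧ (e = 0 ∨ p * 12^(e-1) ≤ m) := by
  induction d with
  | zero =>
    intro m p k hp hd
    refine ⟨0, ?_, by simpa using hd, Or.inl rfl⟩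
    rw [tbNumDigits, dif_neg (by push_neg; intro _; simp only [pow_zero, mul_one] at hd; omega)]
    simp
  | succ d ih =>
    intro m p k hp hd
    rw [tbNumDigits]
    by_cases hg : 0 < p ∧ p ≤ m
    · rw [dif_pos hg]
      obtain ⟨e', h1, h2, h3⟩ := ih m (p * 12) (k + 1) (by positivity)
        (by rw [mul_assoc, ← pow_succ']; exact hd)
      refine ⟨e' + 1, by rw [h1]; push_cast; ring, by rw [pow_succ', ← mul_assoc]; exact h2, Or.inr ?_⟩
      simp only [Nat.add_sub_cancel]
      rcases Nat.eq_zero_or_pos e' with rfl | he'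
      · simpa using hg.2
      · rcases h3 with h3 | h3
        · omega
        · calc p * 12 ^ e' = p * 12 * 12 ^ (e' - 1) := by
                rw [mul_assoc, ← pow_succ', Nat.sub_add_cancel he']
            _ ≤ m := h3
    · rw [dif_neg hg]
      push_neg at hg
      have hm : m < p := hg hp
      exact ⟨0, by simp, by simpa using hm, Or.inl rfl⟩

theorem tbBase_length : tbBase.length = 12 := by decide

-- each of B's digits is drawn from the alphabet
theorem tbDigitAt_mem (m i : Int) : tbDigitAt m i ∈ tbBase := by
  unfold tbDigitAt
  refine PySem.List.pyGetD_mem _ _ ?_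
  have h1 : 0 ≤ PySem.Int.mod (PySem.Int.floordiv m ((12:Int) ^ i.toNat)) 12 :=
    PySem.Int.mod_nonneg _ (by norm_num)
  have h2 : PySem.Int.mod (PySem.Int.floordiv m ((12:Int) ^ i.toNat)) 12 < 12 :=
    PySem.Int.mod_lt _ (by norm_num)
  constructor <;> simp [tbBase_length] <;> omega

-- the main agreement on positive n (Dom gives the 12^9 headroom for the counting lemma)
theorem agree_pos (n : Int) (h0 : 0 < n) (hub : n ≤ 2147483648) :
    tobase12 n = tobase12_alt n := by
  obtain ⟨e, he, hlt, hor⟩ := tbNumDigits_spec 9 n 1 0 (by norm_num) (by norm_num; omega)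
  have hepos : e ≠ 0 := by
    rintro rfl; simp at hlt; omega
  obtain ⟨e', rfl⟩ := Nat.exists_eq_add_of_le (Nat.one_le_iff_ne_zero.mpr hepos)
  rcases hor with h | hge
  · omega
  simp only [Nat.add_sub_cancel_left, one_mul] at hge hlt
  have hA : tbLoopA n [] = (PySem.List.pyRange ((e' : Nat) : Int) (-1) (-1)).map (tbDigitAt n) := by
    rw [tbLoopA_eq_digits e' n [] hge (by rwa [Nat.add_comm] at hlt), List.append_nil]
  unfold tobase12 tobase12_alt
  simp only [beq_iff_eq, if_neg (by omega : ¬ n = 0), if_neg (by omega : ¬ n < 0)]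
  rw [abs_of_pos h0, he, hA,
      show (0:Int) + ((1 + e' : Nat) : Int) - 1 = ((e' : Nat) : Int) by push_cast; ring]

-- the count and the digits at the difference witness
theorem tbCount13 : tbNumDigits 13 1 0 = 2 := by
  rw [tbNumDigits, dif_pos (by norm_num), tbNumDigits, dif_pos (by norm_num),
      tbNumDigits, dif_neg (by norm_num)]
  norm_num

theorem alt_neg13 : tobase12_alt (-13) = "-11" := by
  unfold tobase12_alt
  norm_num [tbCount13]
  decide

theorem tbLoopA_13 : tbLoopA 13 ['-'] = ['1', '1', '-'] := by
  rw [tbLoopA]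
  norm_num [show PySem.Int.floordiv (13:Int) 12 = 1 from by decide,
            show PySem.Int.mod (13:Int) 12 = 1 from by decide]
  rw [tbLoopA]
  norm_num [show PySem.Int.floordiv (1:Int) 12 = 0 from by decide,
            show PySem.Int.mod (1:Int) 12 = 1 from by decide]
  rw [tbLoopA]
  decide

-- ===== VERDICT (by name: the statement is the Claim_ definitions above) =====
theorem tobase12_spec : Claim_unchanged_tobase12 := by
  intro n hdom hD
  have hn : ¬ n < 0 := hD
  by_cases h0 : n = 0
  · subst h0; rfl
  · have hpos : 0 < n := by omega
    have hub : n ≤ 2147483648 := by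
      unfold Dom_tobase12 pvDomInt at hdom
      exact (of_decide_eq_true hdom).2
    show tobase12 n = tobase12_alt n
    exact agree_pos n hpos hub

theorem tobase12_changed : Claim_changed_tobase12 := by
  unfold Claim_changed_tobase12
  refine ⟨by decide, by decide, ?_, alt_neg13, by decide⟩
  show tobase12 (-13) = "11-"
  rw [tobase12]
  norm_num [tbLoopA_13]

theorem tobase12_tight : Claim_exact_tobase12 := by
  intro n hdom hD heq
  have hn : n < 0 := hD
  have hub : -n ≤ 2147483648 := by
    unfold Dom_tobase12 pvDomInt at hdom
    have := (of_decide_eq_true hdom).1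
    omega
  obtain ⟨e, he, hlt, hor⟩ := tbNumDigits_spec 9 (-n) 1 0 (by norm_num) (by norm_num; omega)
  have hepos : e ≠ 0 := by
    rintro rfl; simp at hlt; omega
  obtain ⟨e', rfl⟩ := Nat.exists_eq_add_of_le (Nat.one_le_iff_ne_zero.mpr hepos)
  rcases hor with h | hge
  · omega
  simp only [Nat.add_sub_cancel_left, one_mul] at hge hlt
  have hA : tbLoopA (-n) ['-'] =
      (PySem.List.pyRange ((e' : Nat) : Int) (-1) (-1)).map (tbDigitAt (-n)) ++ ['-'] :=
    tbLoopA_eq_digits e' (-n) ['-'] hge (by rwa [Nat.add_comm] at hlt)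
  unfold tobase12 tobase12_alt at heq
  simp only [beq_iff_eq, if_neg (by omega : ¬ n = 0), if_pos hn] at heq
  rw [abs_of_neg hn, hA] at heq
  have hlist : (PySem.List.pyRange ((e' : Nat) : Int) (-1) (-1)).map (tbDigitAt (-n)) ++ ['-'] =
      '-' :: ((PySem.List.pyRange (tbNumDigits (-n) 1 0 - 1) (-1) (-1)).map (tbDigitAt (-n))) := by
    simpa using congrArg String.toList heq
  rw [PySem.List.pyRange_neg_one_cons (by omega : (-1:Int) < ((e' : Nat) : Int))] at hlist
  have hc : tbDigitAt (-n) ((e' : Nat) : Int) = '-' := by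
    have := congrArg (fun l => l.head?) hlist
    simpa using this
  have hmem : tbDigitAt (-n) ((e' : Nat) : Int) ∈ tbBase := tbDigitAt_mem _ _
  rw [hc] at hmem
  simp [tbBase] at hmem
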